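-- pv_equiv track=rewrite | github.com/1009476063/DICOM2NII-Pro | src/auth/license_manager.py | validate_license_format
-- ===== SOURCE A (Python) =====
-- def validate_license_format(license_code: str) -> bool:
--     """验证授权码格式"""
--     if not license_code:
--         return False
--
--     # 移除空格和转换为大写
--     license_code = license_code.replace(" ", "").upper()
--
--     # 检查格式 XXXX-XXXX-XXXX-XXXX
--     if len(license_code) != 19:  # 16个字符 + 3个破折号
--         return False
--
--     parts = license_code.split('-')
--     if len(parts) != 4:
--         return False
--
--     for part in parts:
--         if len(part) != 4 or not all(c in '0123456789ABCDEF' for c in part):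
--             return False
--
--     return True
-- ===== SOURCE B (Python) =====
-- def validate_license_format(license_code: str) -> bool:
--     """Validate license code format XXXX-XXXX-XXXX-XXXX (hex groups)."""
--     s = license_code.replace(" ", "").upper()
--     if len(s) != 19:
--         return False
--     return all(c == '-' if i % 5 == 4 else c in '0123456789ABCDEF'
--                for i, c in enumerate(s))
-- ===== Notes on version B (the rewrite author's own statement) =====
-- stated objective: simpler
-- what changed: Replaces length-check + split on dashes + per-part length/hex loop by a single positional pass over the normalized string: every fifth character must be the dash separator and all others hex digits.
import Mathlib
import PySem

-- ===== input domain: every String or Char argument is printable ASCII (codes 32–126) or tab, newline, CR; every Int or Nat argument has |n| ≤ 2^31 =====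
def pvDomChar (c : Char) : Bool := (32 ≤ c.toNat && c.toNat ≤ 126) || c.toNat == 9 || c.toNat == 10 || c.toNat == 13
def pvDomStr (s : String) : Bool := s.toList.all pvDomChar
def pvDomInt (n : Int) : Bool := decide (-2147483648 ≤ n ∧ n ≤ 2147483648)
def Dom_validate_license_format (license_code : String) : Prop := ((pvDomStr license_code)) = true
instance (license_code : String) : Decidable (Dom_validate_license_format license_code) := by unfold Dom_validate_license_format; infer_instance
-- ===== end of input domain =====

-- B replaces split-on-dash + per-part loop by one positional pass (index % 5) over the normalized string; return values agree everywhere.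

-- the hex alphabet both Pythons test membership in
def pvHexChars : List Char := "0123456789ABCDEF".toList

-- ===== PORT A =====
-- the 'for part in parts' loop with early return False
def pvPartsLoop : List (List Char) → Bool
  | [] => true
  | p :: rest =>
    if p.length != 4 || !(p.all fun c => PySem.Chars.isIn [c] pvHexChars) then false
    else pvPartsLoop rest

def validate_license_format (license_code : String) : Bool :=
  if license_code == "" then false
  else
    let lc := PySem.Chars.upper (PySem.Chars.replace license_code.toList [' '] [])
    if lc.length != 19 then false
    else
      let parts := PySem.Chars.splitOn lc ['-']
      if parts.length != 4 then false
      else pvPartsLoop parts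

-- ===== PORT B =====
def validate_license_format_alt (license_code : String) : Bool :=
  let s := PySem.Chars.upper (PySem.Chars.replace license_code.toList [' '] [])
  if s.length == 19 then
    (PySem.List.enumerate s 0).all (fun ic =>
      if PySem.Int.mod ic.1 5 == 4 then ic.2 == '-'
      else PySem.Chars.isIn [ic.2] pvHexChars)
  else false

-- ===== PRECONDITION & SPEC =====
def Spec_validate_license_format (license_code : String) (out : Bool) : Prop := out = validate_license_format_alt license_code
instance (license_code : String) (out : Bool) : Decidable (Spec_validate_license_format license_code out) := by unfold Spec_validate_license_format; infer_instance

-- ===== CLAIM (what is proved, stated in full; the proofs are below) =====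
def Claim_equal_validate_license_format : Prop := ∀ (license_code : String), Dom_validate_license_format license_code → Spec_validate_license_format license_code (validate_license_format license_code)

-- ===== LEMMAS AND PROOFS =====

-- structural model of Python's split('-') on a char list
def dsplit : List Char → List (List Char)
  | [] => [[]]
  | c :: t => if c = '-' then [] :: dsplit t
              else (c :: (dsplit t).headI) :: (dsplit t).tail

lemma dsplit_ne_nil (l : List Char) : dsplit l ≠ [] := by
  cases l with
  | nil => simp [dsplit]
  | cons c t => simp only [dsplit]; split <;> simp

lemma splitOn_go_eq (fuel : Nat) (l cur : List Char) (accs : List (List Char))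
    (h : l.length ≤ fuel) :
    PySem.Chars.splitOn.go ['-'] fuel l cur accs =
      accs.reverse ++ (cur.reverse ++ (dsplit l).headI) :: (dsplit l).tail := by
  induction fuel generalizing l cur accs with
  | zero =>
    cases l with
    | nil => simp [PySem.Chars.splitOn.go, dsplit]
    | cons c t => simp at h
  | succ n ih =>
    cases l with
    | nil => simp [PySem.Chars.splitOn.go, dsplit]
    | cons c t =>
      simp only [PySem.Chars.splitOn.go]
      by_cases hc : c = '-'
      · subst hc
        have hpre : List.isPrefixOf ['-'] ('-' :: t) = true := by simp [List.isPrefixOf]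
        rw [if_pos hpre]
        simp only [List.length_singleton, List.drop_succ_cons, List.drop_zero]
        rw [ih t [] (cur.reverse :: accs) (by simpa using Nat.le_of_succ_le_succ h)]
        have hne := dsplit_ne_nil t
        rcases hd : dsplit t with _ | ⟨p, ps⟩
        · exact absurd hd hne
        · simp [dsplit, hd]
      · have hpre : List.isPrefixOf ['-'] (c :: t) = false := by
          simp [List.isPrefixOf]; exact fun hh => (hc hh.symm).elim
        rw [if_neg (by simp [hpre])]
        rw [ih t (c :: cur) accs (by simpa using Nat.le_of_succ_le_succ h)]
        simp [dsplit, hc]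

lemma splitOn_eq_dsplit (l : List Char) : PySem.Chars.splitOn l ['-'] = dsplit l := by
  unfold PySem.Chars.splitOn
  rw [splitOn_go_eq (l.length + 1) l [] [] (by omega)]
  have hne := dsplit_ne_nil l
  rcases hd : dsplit l with _ | ⟨p, ps⟩
  · exact absurd hd hne
  · simp

lemma dsplit_no_dash (p : List Char) (hp : '-' ∉ p) : dsplit p = [p] := by
  induction p with
  | nil => simp [dsplit]
  | cons a t ih =>
    have ha : a ≠ '-' := fun h => hp (h ▸ List.mem_cons_self)
    have ht : '-' ∉ t := fun h => hp (List.mem_cons_of_mem _ h)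
    simp [dsplit, ha, ih ht]

lemma dsplit_append (p rest : List Char) (hp : '-' ∉ p) :
    dsplit (p ++ '-' :: rest) = p :: dsplit rest := by
  induction p with
  | nil => simp [dsplit]
  | cons a t ih =>
    have ha : a ≠ '-' := fun h => hp (h ▸ List.mem_cons_self)
    have ht : '-' ∉ t := fun h => hp (List.mem_cons_of_mem _ h)
    simp [dsplit, ha, ih ht]

-- joining dsplit with '-' recovers the list
def djoin : List (List Char) → List Char
  | [] => []
  | [p] => p
  | p :: q :: r => p ++ '-' :: djoin (q :: r)

lemma djoin_dsplit (l : List Char) : djoin (dsplit l) = l := by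
  induction l with
  | nil => simp [dsplit, djoin]
  | cons c t ih =>
    have hne := dsplit_ne_nil t
    rcases hd : dsplit t with _ | ⟨p, ps⟩
    · exact absurd hd hne
    · rw [hd] at ih
      by_cases hc : c = '-'
      · subst hc; simp [dsplit, hd, djoin, ih]
      · simp only [dsplit, hd, if_neg hc, List.headI, List.tail]
        cases ps with
        | nil => simpa [djoin] using ih
        | cons q r => simpa [djoin] using ih

lemma hex_ne_dash (c : Char) (h : PySem.Chars.isIn [c] pvHexChars = true) : c ≠ '-' := by
  intro he; subst he; exact absurd h (by decide)

lemma no_dash4 (a b c d : Char)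
    (ha : PySem.Chars.isIn [a] pvHexChars = true) (hb : PySem.Chars.isIn [b] pvHexChars = true)
    (hc : PySem.Chars.isIn [c] pvHexChars = true) (hd : PySem.Chars.isIn [d] pvHexChars = true) :
    '-' ∉ ([a, b, c, d] : List Char) := by
  intro hm
  simp only [List.mem_cons, List.not_mem_nil, or_false] at hm
  rcases hm with h | h | h | h
  · exact hex_ne_dash a ha h.symm
  · exact hex_ne_dash b hb h.symm
  · exact hex_ne_dash c hc h.symm
  · exact hex_ne_dash d hd h.symm

lemma len4_struct (l : List Char) (h : l.length = 4) :
    ∃ a b c d, l = [a, b, c, d] := by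
  rcases l with _ | ⟨a, _ | ⟨b, _ | ⟨c, _ | ⟨d, _ | ⟨e, t⟩⟩⟩⟩⟩ <;> simp_all

-- the core equivalence on the normalized char list of length 19
lemma core_eq (t : List Char) (ht : t.length = 19) :
    (if (dsplit t).length != 4 then false else pvPartsLoop (dsplit t)) =
    (PySem.List.enumerate t 0).all (fun ic =>
      if PySem.Int.mod ic.1 5 == 4 then ic.2 == '-'
      else PySem.Chars.isIn [ic.2] pvHexChars) := by
  rcases t with _ | ⟨a0, _ | ⟨a1, _ | ⟨a2, _ | ⟨a3, _ | ⟨a4, _ | ⟨a5, _ | ⟨a6, _ | ⟨a7, _ | ⟨a8, _ | ⟨a9, _ | ⟨a10, _ | ⟨a11, _ | ⟨a12, _ | ⟨a13, _ | ⟨a14, _ | ⟨a15, _ | ⟨a16, _ | ⟨a17, _ | ⟨a18, rest⟩⟩⟩⟩⟩⟩⟩⟩⟩⟩⟩⟩⟩⟩⟩⟩⟩⟩⟩ <;> simp_all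
  rw [Bool.eq_iff_iff]
  simp only [Bool.and_eq_true, decide_eq_true_eq, beq_iff_eq]
  constructor
  · rintro ⟨h4, hloop⟩
    rcases hd : dsplit [a0, a1, a2, a3, a4, a5, a6, a7, a8, a9, a10, a11, a12, a13, a14, a15, a16, a17, a18]
      with _ | ⟨p0, _ | ⟨p1, _ | ⟨p2, _ | ⟨p3, _ | ⟨p4, ps⟩⟩⟩⟩⟩ <;> rw [hd] at h4 hloop <;> simp_all [pvPartsLoop]
    obtain ⟨⟨l0, x0⟩, ⟨l1, x1⟩, ⟨l2, x2⟩, l3, x3⟩ := hloop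
    obtain ⟨b0, b1, b2, b3, rfl⟩ := len4_struct p0 l0
    obtain ⟨c0, c1, c2, c3, rfl⟩ := len4_struct p1 l1
    obtain ⟨d0, d1, d2, d3, rfl⟩ := len4_struct p2 l2
    obtain ⟨e0, e1, e2, e3, rfl⟩ := len4_struct p3 l3
    have hjoin := djoin_dsplit [a0, a1, a2, a3, a4, a5, a6, a7, a8, a9, a10, a11, a12, a13, a14, a15, a16, a17, a18]
    rw [hd] at hjoin
    simp only [djoin, List.cons_append, List.nil_append] at hjoin
    simp only [List.cons.injEq] at hjoin
    simp_all
    exact ⟨(hjoin.2.2.2.2.1).symm, (hjoin.2.2.2.2.2.2.2.2.2.1).symm,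
      (hjoin.2.2.2.2.2.2.2.2.2.2.2.2.2.2.1).symm⟩
  · rintro ⟨x0, x1, x2, x3, hd4, x5, x6, x7, x8, hd9, x10, x11, x12, x13, hd14, x15, x16, x17, x18⟩
    subst hd4; subst hd9; subst hd14
    rw [show ([a0, a1, a2, a3, '-', a5, a6, a7, a8, '-', a10, a11, a12, a13, '-', a15, a16, a17, a18] : List Char)
        = [a0, a1, a2, a3] ++ '-' :: ([a5, a6, a7, a8] ++ '-' :: ([a10, a11, a12, a13] ++ '-' :: [a15, a16, a17, a18])) from rfl,
      dsplit_append _ _ (no_dash4 _ _ _ _ x0 x1 x2 x3),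
      dsplit_append _ _ (no_dash4 _ _ _ _ x5 x6 x7 x8),
      dsplit_append _ _ (no_dash4 _ _ _ _ x10 x11 x12 x13),
      dsplit_no_dash _ (no_dash4 _ _ _ _ x15 x16 x17 x18)]
    simp [pvPartsLoop, x0, x1, x2, x3, x5, x6, x7, x8, x10, x11, x12, x13, x15, x16, x17, x18]

theorem validate_license_format_spec : Claim_equal_validate_license_format := by
  intro s _
  unfold Spec_validate_license_format
  by_cases hs : s = ""
  · subst hs; decide
  · have hs' : (s == "") = false := by simpa using hs
    unfold validate_license_format validate_license_format_alt
    rw [hs']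
    simp only [Bool.false_eq_true, if_false]
    by_cases hlen : (PySem.Chars.upper (PySem.Chars.replace s.toList [' '] [])).length = 19
    · simp only [hlen, splitOn_eq_dsplit, bne_self_eq_false, Bool.false_eq_true, if_false,
        beq_self_eq_true, if_true]
      exact core_eq _ hlen
    · simp [hlen]
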